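-- pv_equiv track=rewrite | github.com/bebetterest/OpenCompany | src/opencompany/mcp/oauth.py | parse_resource_metadata_url
-- ===== SOURCE A (Python) =====
-- def parse_resource_metadata_url(header_value: str | None) -> str:
--     normalized = str(header_value or "").strip()
--     if not normalized:
--         return ""
--     lower = normalized.lower()
--     marker = "resource_metadata="
--     index = lower.find(marker)
--     if index < 0:
--         return ""
--     value = normalized[index + len(marker) :].lstrip()
--     if not value:
--         return ""
--     if value[0] == '"':
--         end_index = 1
--         escaped = False
--         while end_index < len(value):
--             char = value[end_index]
--             if char == '"' and not escaped:
--                 return value[1:end_index]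
--             escaped = char == "\\" and not escaped
--             if char != "\\":
--                 escaped = False
--             end_index += 1
--         return ""
--     for separator in (",", " "):
--         separator_index = value.find(separator)
--         if separator_index >= 0:
--             return value[:separator_index].strip()
--     return value.strip()
-- ===== SOURCE B (Python) =====
-- _MARKER = "resource_metadata="
--
-- def parse_resource_metadata_url(header_value):
--     text = (header_value or "").strip()
--     pos = text.lower().find(_MARKER)
--     if pos < 0:
--         return ""
--     rest = text[pos + len(_MARKER):].lstrip()
--     if not rest.startswith('"'):
--         comma = rest.find(",")
--         if comma >= 0:
--             return rest[:comma].strip()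
--         space = rest.find(" ")
--         if space >= 0:
--             return rest[:space].strip()
--         return rest.strip()
--     body = []
--     i = 1
--     while i < len(rest):
--         ch = rest[i]
--         if ch == '"':
--             return "".join(body)
--         body.append(ch)
--         if ch == "\\":
--             if i + 1 < len(rest):
--                 body.append(rest[i + 1])
--             i += 2
--         else:
--             i += 1
--     return ""
-- ===== Notes on version B (the rewrite author's own statement) =====
-- stated objective: alternative
-- what changed: The quoted-value branch replaces A's escape-flag state machine (recomputing the flag at every step) by a scan that consumes a backslash together with its escaped character in one two-index step while accumulating the body, and B drops A's redundant empty-string early-returns and unrolls the separator tuple loop.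
import Mathlib
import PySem

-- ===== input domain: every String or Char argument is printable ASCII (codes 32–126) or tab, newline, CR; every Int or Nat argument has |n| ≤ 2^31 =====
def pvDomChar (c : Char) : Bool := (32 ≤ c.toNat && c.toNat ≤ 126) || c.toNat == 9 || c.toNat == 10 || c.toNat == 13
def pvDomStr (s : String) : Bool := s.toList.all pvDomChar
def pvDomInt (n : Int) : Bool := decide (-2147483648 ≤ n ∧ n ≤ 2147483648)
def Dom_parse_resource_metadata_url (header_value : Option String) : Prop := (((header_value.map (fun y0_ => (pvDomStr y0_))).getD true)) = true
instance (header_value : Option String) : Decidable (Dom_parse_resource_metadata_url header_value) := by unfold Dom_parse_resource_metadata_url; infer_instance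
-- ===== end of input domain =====

-- B replaces A's escape-flag state machine in the quoted branch by a scan that consumes a
-- backslash together with its escaped character in one step, and drops A's redundant
-- emptiness early-returns (objective: alternative decomposition, same cost).

-- ===== PORT A =====
-- A's while loop scanning for the closing quote: `rem` is value[end_index:], `acc` is value[1:end_index]
def pvA_scan : List Char → List Char → Bool → String
  | [], _, _ => ""
  | c :: rem, acc, escaped =>
    if c = '"' ∧ escaped = false then String.ofList acc
    else
      let escaped1 : Bool := decide (c = '\\') && !escaped
      let escaped2 : Bool := if c ≠ '\\' then false else escaped1
      pvA_scan rem (acc ++ [c]) escaped2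

-- A's `for separator in (",", " "): …` with the trailing `return value.strip()`
def pvA_sepLoop (value : List Char) : List (List Char) → String
  | [] => String.ofList (PySem.Chars.strip value)
  | sep :: more =>
    let separator_index := PySem.Chars.find value sep
    if separator_index ≥ 0 then
      String.ofList (PySem.Chars.strip (PySem.Chars.slice value none (some separator_index)))
    else pvA_sepLoop value more

-- the body of A after `normalized = str(header_value or "").strip()`
def pvA_body (normalized : List Char) : String :=
  if normalized = [] then ""
  else
    let lower := PySem.Chars.lower normalized
    let marker := "resource_metadata=".toList
    let index := PySem.Chars.find lower marker
    if index < 0 then ""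
    else
      let value := PySem.Chars.lstrip
        (PySem.Chars.slice normalized (some (index + (marker.length : Int))) none)
      match value with
      | [] => ""
      | c :: rem =>  -- `value[0] == '"'` (value is nonempty here)
        if c = '"' then pvA_scan rem [] false
        else pvA_sepLoop (c :: rem) [",".toList, " ".toList]

def parse_resource_metadata_url (header_value : Option String) : String :=
  pvA_body (PySem.Chars.strip
    (match header_value with | none => "" | some s => if s = "" then "" else s).toList)

-- ===== PORT B =====
-- B's while loop: on a backslash, keep it and the escaped char (if any) and step by two
def pvB_scan : List Char → List Char → String
  | [], _ => ""
  | c :: rem, body =>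
    if c = '"' then String.ofList body
    else if c = '\\' then pvB_scan (rem.drop 1) (body ++ c :: rem.take 1)
    else pvB_scan rem (body ++ [c])
  termination_by l _ => l.length
  decreasing_by all_goals (simp only [List.length_drop, List.length_cons]; omega)

-- the body of B after `text = (header_value or "").strip()`
def pvB_body (text : List Char) : String :=
  let pos := PySem.Chars.find (PySem.Chars.lower text) "resource_metadata=".toList
  if pos < 0 then ""
  else
    let rest := PySem.Chars.lstrip
      (PySem.Chars.slice text (some (pos + ("resource_metadata=".toList.length : Int))) none)
    if PySem.Chars.startswith rest "\"".toList = false then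
      let comma := PySem.Chars.find rest ",".toList
      if comma ≥ 0 then String.ofList (PySem.Chars.strip (PySem.Chars.slice rest none (some comma)))
      else
        let space := PySem.Chars.find rest " ".toList
        if space ≥ 0 then String.ofList (PySem.Chars.strip (PySem.Chars.slice rest none (some space)))
        else String.ofList (PySem.Chars.strip rest)
    else pvB_scan rest.tail []  -- i = 1

def parse_resource_metadata_url_alt (header_value : Option String) : String :=
  pvB_body (PySem.Chars.strip
    (match header_value with | none => "" | some s => if s = "" then "" else s).toList)

-- ===== PRECONDITION & SPEC =====
def Spec_parse_resource_metadata_url (header_value : Option String) (out : String) : Prop := out = parse_resource_metadata_url_alt header_value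
instance (header_value : Option String) (out : String) : Decidable (Spec_parse_resource_metadata_url header_value out) := by unfold Spec_parse_resource_metadata_url; infer_instance

-- ===== CLAIM (what is proved, stated in full; the proofs are below) =====
def Claim_equal_parse_resource_metadata_url : Prop := ∀ (header_value : Option String), Dom_parse_resource_metadata_url header_value → Spec_parse_resource_metadata_url header_value (parse_resource_metadata_url header_value)

-- ===== LEMMAS AND PROOFS =====

-- the two quoted-string scans agree whenever A's escape flag is clear: a quote terminates
-- both; a backslash sets A's flag, which the next character (never a terminator, and never
-- leaving the flag set) clears — exactly B's two-character step
theorem pv_scan_eq : ∀ (n : Nat) (l acc : List Char), l.length ≤ n →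
    pvA_scan l acc false = pvB_scan l acc := by
  intro n
  induction n with
  | zero =>
    intro l acc h
    have : l = [] := List.eq_nil_of_length_eq_zero (by omega)
    subst this; simp [pvA_scan, pvB_scan]
  | succ n ih =>
    intro l acc h
    match l with
    | [] => simp [pvA_scan, pvB_scan]
    | c :: rem =>
      simp only [pvA_scan, pvB_scan]
      by_cases hq : c = '"'
      · simp [hq]
      · rw [if_neg (by simp [hq]), if_neg hq]
        by_cases hb : c = '\\'
        · rw [if_pos hb]
          subst hb
          rw [if_neg (by decide)]
          simp only [Bool.not_false, Bool.and_true]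
          match rem with
          | [] => simp [pvA_scan, pvB_scan]
          | d :: rem' =>
            simp only [pvA_scan, List.drop_succ_cons, List.drop_zero,
              List.take_succ_cons, List.take_zero]
            rw [if_neg (by simp)]
            simp only [ne_eq]
            rw [show (if ¬d = '\\' then false else (decide (d = '\\') && !decide True)) = false
                from by by_cases hd : d = '\\' <;> simp [hd]]
            rw [show acc ++ ['\\'] ++ [d] = acc ++ ['\\', d] by simp]
            exact ih _ _ (by simp at h ⊢; omega)
        · rw [if_neg hb, if_pos hb]
          exact ih _ _ (by simp at h; omega)

-- after the shared normalization / marker search / lstrip, the two bodies agree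
theorem pv_body_eq (s : List Char) : pvA_body s = pvB_body s := by
  by_cases hs : s = []
  · subst hs; decide
  · unfold pvA_body pvB_body
    rw [if_neg hs]
    by_cases hidx : PySem.Chars.find (PySem.Chars.lower s) "resource_metadata=".toList < 0
    · rw [if_pos hidx, if_pos hidx]
    · rw [if_neg hidx, if_neg hidx]
      set value := PySem.Chars.lstrip
        (PySem.Chars.slice s
          (some (PySem.Chars.find (PySem.Chars.lower s) "resource_metadata=".toList +
            ("resource_metadata=".toList.length : Int)))) with hv
      clear_value value
      cases value with
      | nil => decide
      | cons c rem =>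
        dsimp only
        by_cases hc : c = '"'
        · subst hc
          rw [if_pos rfl, if_neg (by simp [PySem.Chars.startswith, List.isPrefixOf])]
          simp only [List.tail_cons]
          exact pv_scan_eq rem.length rem [] le_rfl
        · rw [if_neg hc,
            if_pos (by simp [PySem.Chars.startswith, List.isPrefixOf, Ne.symm hc])]
          simp [pvA_sepLoop]

-- ===== VERDICT (by name: the statement is the Claim_ definition above) =====
theorem parse_resource_metadata_url_spec : Claim_equal_parse_resource_metadata_url := by
  intro header_value _
  unfold Spec_parse_resource_metadata_url parse_resource_metadata_url parse_resource_metadata_url_alt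
  exact pv_body_eq _
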